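-- pv_equiv track=rewrite | github.com/ACK101101/Intro-to-AI | multiagent/csp_2.py | check_assign
-- ===== SOURCE A (Python) =====
-- def small_add(la, lb):
--     cx = 0
--     f = la + lb
--     if f >= 10:     cx = 1
--     return f, cx
--
-- def big_add(letters):
--     f0, c0 = small_add(letters['D'], letters['D'])
--     f1, c1 = small_add(letters['L'], letters['L'])
--     f2, c2 = small_add(letters['A'], letters['A'])
--     f3, c3 = small_add(letters['N'], letters['R'])
--     f4, c4 = small_add(letters['O'], letters['E'])
--     f5, c5 = small_add(letters['D'], letters['G'])
--     f = [f0, f1, f2, f3, f4, f5]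
--     c = [c0, c1, c2, c3, c4, c5]
--     final = 0
--     for i in range(len(f)):
--         final += f[i] * 10**i
--     return final
--
-- def check_assign(letters):
--     for l in letters.keys():
--         if letters[l] == -1:
--             return False
--
--     d_plus_g = big_add(letters)
--     final = 0
--     f = ['T', 'R', 'E', 'B', 'O', 'R']
--     for i in range(len(f)):
--         final += letters[f[i]] * 10**i
--     if final == d_plus_g:
--         return True
--     return False
-- ===== SOURCE B (Python) =====
-- COLS = [('D', 'D', 'T'), ('L', 'L', 'R'), ('A', 'A', 'E'),
--         ('N', 'R', 'B'), ('O', 'E', 'O'), ('D', 'G', 'R')]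
--
-- def check_assign(letters):
--     if any(v == -1 for v in letters.values()):
--         return False
--     carry = 0
--     for x, y, z in COLS:
--         s = letters[x] + letters[y] - letters[z] + carry
--         if s % 10 != 0:
--             return False
--         carry = s // 10
--     return carry == 0
-- ===== Notes on version B (the rewrite author's own statement) =====
-- stated objective: alternative
-- what changed: Instead of building two base-10 numbers (power-sum loops over 10**i) and comparing them, B walks the six addition columns once with carry/borrow propagation: each column sum-minus-result plus incoming carry must be divisible by 10, the quotient is carried on, and the final carry must be 0.
import Mathlib
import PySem

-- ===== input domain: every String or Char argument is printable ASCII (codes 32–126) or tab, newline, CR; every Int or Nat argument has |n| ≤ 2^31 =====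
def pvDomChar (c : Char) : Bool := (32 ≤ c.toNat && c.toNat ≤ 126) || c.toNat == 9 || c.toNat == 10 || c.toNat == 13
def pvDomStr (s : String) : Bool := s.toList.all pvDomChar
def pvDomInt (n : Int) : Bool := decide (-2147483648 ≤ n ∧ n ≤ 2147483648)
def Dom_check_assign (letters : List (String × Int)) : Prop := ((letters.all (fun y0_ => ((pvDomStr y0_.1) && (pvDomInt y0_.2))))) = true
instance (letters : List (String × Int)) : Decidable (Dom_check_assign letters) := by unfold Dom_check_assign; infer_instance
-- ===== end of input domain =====

-- B replaces A's pair of base-10 power-sum evaluations by a single column-wise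
-- carry-propagation pass (each column difference plus carry must be divisible by 10,
-- final carry 0); objective: alternative (same cost, different algorithm).

-- ===== PORT A =====
def pvSmallAdd (la lb : Int) : Int × Int :=
  let cx : Int := 0
  let f := la + lb
  let cx := if f ≥ 10 then (1 : Int) else cx
  (f, cx)

def pvBigAdd (d : PySem.Dict String Int) : Int :=
  let p0 := pvSmallAdd (d.getD "D" 0) (d.getD "D" 0)
  let p1 := pvSmallAdd (d.getD "L" 0) (d.getD "L" 0)
  let p2 := pvSmallAdd (d.getD "A" 0) (d.getD "A" 0)
  let p3 := pvSmallAdd (d.getD "N" 0) (d.getD "R" 0)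
  let p4 := pvSmallAdd (d.getD "O" 0) (d.getD "E" 0)
  let p5 := pvSmallAdd (d.getD "D" 0) (d.getD "G" 0)
  let f := [p0.1, p1.1, p2.1, p3.1, p4.1, p5.1]
  (PySem.List.pyRange 0 (PySem.List.len f) 1).foldl
    (fun final i => final + PySem.List.pyGetD f i 0 * 10 ^ i.toNat) 0

def check_assign (letters : List (String × Int)) : Bool :=
  let d := PySem.Dict.ofList letters
  if d.keys.any (fun l => d.getD l 0 == -1) then false
  else
    let d_plus_g := pvBigAdd d
    let f : List String := ["T", "R", "E", "B", "O", "R"]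
    let final := (PySem.List.pyRange 0 (PySem.List.len f) 1).foldl
      (fun final i => final + d.getD (PySem.List.pyGetD f i "") 0 * 10 ^ i.toNat) 0
    if final == d_plus_g then true else false

-- ===== PORT B =====
def pvCols : List (String × String × String) :=
  [("D", "D", "T"), ("L", "L", "R"), ("A", "A", "E"),
   ("N", "R", "B"), ("O", "E", "O"), ("D", "G", "R")]

def pvCarryLoop (d : PySem.Dict String Int) : List (String × String × String) → Int → Bool
  | [], carry => carry == 0
  | (x, y, z) :: rest, carry =>
    let s := d.getD x 0 + d.getD y 0 - d.getD z 0 + carry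
    if PySem.Int.mod s 10 ≠ 0 then false
    else pvCarryLoop d rest (PySem.Int.floordiv s 10)

def check_assign_alt (letters : List (String × Int)) : Bool :=
  let d := PySem.Dict.ofList letters
  if d.values.any (fun v => v == -1) then false
  else pvCarryLoop d pvCols 0

-- ===== PRECONDITION & SPEC =====
-- Pre_ excludes exactly the inputs where A raises KeyError: no value is -1 (so the guard does
-- not return early) and one of the ten letters used by the equation is missing.
def Pre_check_assign (letters : List (String × Int)) : Prop :=
  ((PySem.Dict.ofList letters).values.any (fun v => v == -1)) = true ∨
  (∀ k ∈ (["D", "L", "A", "N", "R", "O", "E", "G", "T", "B"] : List String),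
    (PySem.Dict.ofList letters).contains k = true)
instance (letters : List (String × Int)) : Decidable (Pre_check_assign letters) := by
  unfold Pre_check_assign; infer_instance
def pvWitness_check_assign : (List (String × Int)) :=
  [("D", 5), ("O", 2), ("N", 6), ("A", 4), ("L", 8), ("G", 1), ("E", 9), ("R", 7), ("B", 3), ("T", 0)]
def Spec_check_assign (letters : List (String × Int)) (out : Bool) : Prop := out = check_assign_alt letters
instance (letters : List (String × Int)) (out : Bool) : Decidable (Spec_check_assign letters out) := by unfold Spec_check_assign; infer_instance

-- ===== CLAIM (what is proved, stated in full; the proofs are below) =====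
def Claim_equal_check_assign : Prop := ∀ (letters : List (String × Int)), Dom_check_assign letters → Pre_check_assign letters → Spec_check_assign letters (check_assign letters)

-- ===== LEMMAS AND PROOFS =====

-- A's -1 guard scans keys and looks each key up; B's scans the values: equal on any dict built
-- by ofList, whose keys are unique.
theorem pv_guard_eq (letters : List (String × Int)) :
    ((PySem.Dict.ofList letters).keys.any
      (fun l => (PySem.Dict.ofList letters).getD l 0 == -1)) =
    ((PySem.Dict.ofList letters).values.any (fun v => v == -1)) := by
  rw [PySem.Dict.values_eq_map_keys (PySem.Dict.ofList letters)
    (PySem.Dict.nodup_keys_ofList letters) 0, List.any_map]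
  rfl

-- The six-digit low-to-high power-sum loop of A, in closed form.
theorem pv_powsum (a b c d e f : Int) :
    (PySem.List.pyRange 0 (PySem.List.len [a, b, c, d, e, f]) 1).foldl
      (fun final i => final + PySem.List.pyGetD [a, b, c, d, e, f] i 0 * 10 ^ i.toNat) 0
    = a + b * 10 + c * 100 + d * 1000 + e * 10000 + f * 100000 := by
  rw [show PySem.List.pyRange 0 (PySem.List.len [a, b, c, d, e, f]) 1 = [0, 1, 2, 3, 4, 5] by
        simp [PySem.List.len_eq]; decide]
  simp [List.foldl, PySem.List.pyGetD_ofNat']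

-- ===== VERDICT (by name: the statement is the Claim_ definition above) =====
theorem check_assign_spec : Claim_equal_check_assign := by
  intro letters _ _
  unfold Spec_check_assign
  dsimp only [check_assign, check_assign_alt, pvBigAdd, pvSmallAdd, pvCols]
  rw [pv_guard_eq]
  cases h : ((PySem.Dict.ofList letters).values.any (fun v => v == -1)) with
  | true => simp
  | false =>
    simp only [Bool.false_eq_true, if_false]
    rw [pv_powsum,
        show PySem.List.pyRange 0 (PySem.List.len (["T", "R", "E", "B", "O", "R"] : List String)) 1
          = [0, 1, 2, 3, 4, 5] by decide]
    simp only [List.foldl, PySem.List.pyGetD_ofNat', List.getD, List.getElem?_cons_zero,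
      List.getElem?_cons_succ, Option.getD_some, pvCarryLoop]
    simp only [PySem.Int.mod_eq_emod_of_pos (show (0:Int) < 10 by norm_num),
      PySem.Int.floordiv_eq_ediv_of_pos (show (0:Int) < 10 by norm_num)]
    simp only [show (10:Int) ^ Int.toNat 0 = 1 from rfl, show (10:Int) ^ Int.toNat 1 = 10 from rfl,
      show (10:Int) ^ Int.toNat 2 = 100 from rfl, show (10:Int) ^ Int.toNat 3 = 1000 from rfl,
      show (10:Int) ^ Int.toNat 4 = 10000 from rfl, show (10:Int) ^ Int.toNat 5 = 100000 from rfl]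
    split_ifs <;>
      simp only [beq_iff_eq, ne_eq, Decidable.not_not, Bool.true_eq, Bool.false_eq,
        Bool.true_eq_false, Bool.false_eq_true, beq_eq_false_iff_ne] at * <;>
      omega
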